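-- pv_equiv track=rewrite | github.com/HBinhCT/Q-project | hackerrank/Algorithms/Fun Game/solution.py | funGame
-- ===== SOURCE A (Python) =====
-- def funGame(a, b):
--     ln = len(a)
--     totals = [a[i] + b[i] for i in range(ln)]
--     add = turn = 0
--     for i in range(ln):
--         idx = totals.index(max(totals))
--         if turn == 0:
--             add += a[idx]
--         if turn == 1:
--             add -= b[idx]
--         totals.pop(idx)
--         a.pop(idx)
--         b.pop(idx)
--         turn = 1 - turn
--     if add > 0:
--         return 'First'
--     elif add < 0:
--         return 'Second'
--     else:
--         return 'Tie'
-- ===== SOURCE B (Python) =====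
-- def funGame(a, b):
--     pairs = list(zip(a, b))
--     t = sorted((x + y for x, y in pairs), reverse=True)
--     add = sum(t[::2]) - sum(y for _, y in pairs)
--     if add > 0:
--         return 'First'
--     elif add < 0:
--         return 'Second'
--     else:
--         return 'Tie'
-- ===== Notes on version B (the rewrite author's own statement) =====
-- stated objective: faster
-- what changed: Replaces the quadratic loop that repeatedly scans for the max total and pops from three lists by one descending sort of the totals plus the algebraic identity add = sum(sorted totals at even positions) - sum(b-part), so the individual a/b values of tied picks cancel out.
import Mathlib
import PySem

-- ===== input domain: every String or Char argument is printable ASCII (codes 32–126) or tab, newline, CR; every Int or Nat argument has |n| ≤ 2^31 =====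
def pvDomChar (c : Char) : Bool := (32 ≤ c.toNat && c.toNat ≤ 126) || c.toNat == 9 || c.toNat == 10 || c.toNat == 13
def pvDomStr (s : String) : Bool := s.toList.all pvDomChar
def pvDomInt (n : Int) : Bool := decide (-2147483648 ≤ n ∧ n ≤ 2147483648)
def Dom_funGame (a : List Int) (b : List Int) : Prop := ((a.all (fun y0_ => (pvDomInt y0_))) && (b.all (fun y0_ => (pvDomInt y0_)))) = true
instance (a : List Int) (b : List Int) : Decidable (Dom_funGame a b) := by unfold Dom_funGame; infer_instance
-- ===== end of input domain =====

-- B replaces A's quadratic pick-max-and-pop loop by one descending sort of the totals and the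
-- identity add = sum(sorted totals[::2]) - sum(second components): a different, asymptotically faster algorithm.
-- A empties its argument lists in place (pop); the equivalence proved here is about the RETURN value only (B does not mutate).


-- ===== PORT A =====
-- the for-loop of A: fuel = ln, state (totals, a, b, add, turn).
-- max(totals) / totals.index(...) raise only on an empty list — unreachable here, since the loop
-- pops exactly one element per iteration and runs totals.length times, so the 'none' branches
-- are never taken on inputs admitted by Pre_.  a[idx] / b[idx] are ported with pyGetD: idx comes
-- from index?, hence 0 ≤ idx < totals.length, and under Pre_ both lists are at least that long,
-- so pyGetD is exact; list.pop(idx) at such an in-range index is exactly eraseIdx.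
def funGameLoop : Nat → List Int → List Int → List Int → Int → Int → Int
  | 0, _, _, _, add, _ => add
  | n+1, totals, a, b, add, turn =>
    match PySem.List.max? totals (fun x => x) with
    | none => add
    | some m =>
      match PySem.List.index? totals m with
      | none => add
      | some idx =>
        let add1 := if turn = 0 then add + PySem.List.pyGetD a (idx : Int) 0 else add
        let add2 := if turn = 1 then add1 - PySem.List.pyGetD b (idx : Int) 0 else add1
        funGameLoop n (totals.eraseIdx idx) (a.eraseIdx idx) (b.eraseIdx idx) add2 (1 - turn)

def funGame (a : List Int) (b : List Int) : String :=
  let ln := a.length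
  let totals := (PySem.List.pyRange 0 (ln : Int) 1).map
    (fun i => PySem.List.pyGetD a i 0 + PySem.List.pyGetD b i 0)
  let add := funGameLoop ln totals a b 0 0
  if add > 0 then "First" else if add < 0 then "Second" else "Tie"

-- ===== PORT B =====
def funGame_alt (a : List Int) (b : List Int) : String :=
  let pairs := a.zip b
  let t := PySem.List.sorted (pairs.map (fun p => p.1 + p.2)) (fun x => x) true
  let add := ((PySem.List.slice? t none none 2).getD []).sum - (pairs.map (fun p => p.2)).sum
  if add > 0 then "First" else if add < 0 then "Second" else "Tie"

-- ===== PRECONDITION & SPEC =====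
-- A raises IndexError (b[i] in the totals comprehension) exactly when len(b) < len(a); Pre_ excludes only that.
def Pre_funGame (a : List Int) (b : List Int) : Prop := a.length ≤ b.length
instance (a : List Int) (b : List Int) : Decidable (Pre_funGame a b) := by unfold Pre_funGame; infer_instance
def pvWitness_funGame : List Int × List Int := ([1, 2, 3], [4, 5, 6])

def Spec_funGame (a : List Int) (b : List Int) (out : String) : Prop := out = funGame_alt a b
instance (a : List Int) (b : List Int) (out : String) : Decidable (Spec_funGame a b out) := by unfold Spec_funGame; infer_instance

-- ===== CLAIM (what is proved, stated in full; the proofs are below) =====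
def Claim_equal_funGame : Prop := ∀ (a : List Int) (b : List Int), Dom_funGame a b → Pre_funGame a b → Spec_funGame a b (funGame a b)

-- ===== LEMMAS AND PROOFS =====

-- the elements of xs at even positions (what xs[::2] selects)
def evens : List Int → List Int
  | [] => []
  | [x] => [x]
  | x :: _ :: r => x :: evens r

theorem evens_cons (x : Int) (l : List Int) : evens (x :: l) = x :: evens l.tail := by
  cases l <;> simp [evens]

theorem filterMap_even_idx : ∀ (xs : List Int),
    (List.range ((xs.length + 1) / 2)).filterMap (fun k => xs[2 * k]?) = evens xs
  | [] => by simp [evens]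
  | [x] => by simp [evens]
  | x :: y :: r => by
    have h : ((x :: y :: r).length + 1) / 2 = (r.length + 1) / 2 + 1 := by simp; omega
    rw [h, List.range_succ_eq_map, List.filterMap_cons, List.filterMap_map]
    have ih := filterMap_even_idx r
    simp only [Nat.mul_zero, List.getElem?_cons_zero, evens]
    rw [← ih]
    congr 1

theorem slice?_step_two (xs : List Int) :
    PySem.List.slice? xs none none 2 = some (evens xs) := by
  rw [← filterMap_even_idx xs]
  simp only [PySem.List.slice?, PySem.List.sliceIndices]
  norm_num
  have hc : (if 0 < xs.length then (((xs.length : Int) + 2 - 1) / 2).toNat else 0) = (xs.length + 1) / 2 := by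
    split_ifs with h
    · omega
    · omega
  rw [hc]
  apply List.filterMap_congr
  intro k _
  have : (2 * (k : Int)).toNat = 2 * k := by omega
  rw [this]

-- proof-side single-list reformulation of A's loop: state = list of (a_i, b_i) pairs
def pairLoop : Nat → List (Int × Int) → Int → Int → Int
  | 0, _, add, _ => add
  | n+1, ps, add, turn =>
    let ts := ps.map (fun p => p.1 + p.2)
    match PySem.List.max? ts (fun x => x) with
    | none => add
    | some m =>
      match PySem.List.index? ts m with
      | none => add
      | some idx =>
        let add1 := if turn = 0 then add + (ps.getD idx (0, 0)).1 else add
        let add2 := if turn = 1 then add1 - (ps.getD idx (0, 0)).2 else add1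
        pairLoop n (ps.eraseIdx idx) add2 (1 - turn)

-- A's selection step on the totals list IS the head step of the descending sort:
-- removing any occurrence of the maximum and sorting the rest prepends that maximum.
theorem sorted_rev_head_step (ts : List Int) (m : Int) (idx : Nat)
    (hm : PySem.List.max? ts (fun x => x) = some m)
    (hi : PySem.List.index? ts m = some idx) :
    PySem.List.sorted ts (fun x => x) true = m :: PySem.List.sorted (ts.eraseIdx idx) (fun x => x) true := by
  obtain ⟨hk, hget, -⟩ := PySem.List.getElem_of_index?_eq_some hi
  have hmax := PySem.List.max?_isMax hm
  have hperm : (PySem.List.sorted ts (fun x => x) true).Perm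
      (m :: PySem.List.sorted (ts.eraseIdx idx) (fun x => x) true) := by
    refine (PySem.List.sorted_perm ts _ true).trans ?_
    refine ((hget ▸ List.getElem_cons_eraseIdx_perm hk).symm).trans ?_
    exact List.Perm.cons m (PySem.List.sorted_perm _ _ true).symm
  have h1 : (PySem.List.sorted ts (fun x => x) true).Pairwise (fun a b => b ≤ a) :=
    PySem.List.sorted_pairwise_rev ts _
  have h2 : (m :: PySem.List.sorted (ts.eraseIdx idx) (fun x => x) true).Pairwise (fun a b => b ≤ a) := by
    refine List.Pairwise.cons ?_ (PySem.List.sorted_pairwise_rev _ _)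
    intro y hy
    exact hmax y (List.mem_of_mem_eraseIdx ((PySem.List.sorted_perm _ _ true).mem_iff.mp hy))
  exact PySem.List.eq_of_perm_of_pairwise_le_of_injective (fun x => -x) neg_injective hperm
    (h1.imp (by intro a b h; simp only [neg_le_neg_iff]; exact h))
    (h2.imp (by intro a b h; simp only [neg_le_neg_iff]; exact h))

-- the loop's value in closed form: alternating sum over the sorted totals minus the snd-sum
theorem pairLoop_closed (n : Nat) : ∀ (ps : List (Int × Int)) (add : Int), ps.length = n →
    (pairLoop n ps add 0 =
      add + (evens (PySem.List.sorted (ps.map (fun p => p.1 + p.2)) (fun x => x) true)).sum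
          - (ps.map (fun p => p.2)).sum)
    ∧ (pairLoop n ps add 1 =
      add + (evens (PySem.List.sorted (ps.map (fun p => p.1 + p.2)) (fun x => x) true).tail).sum
          - (ps.map (fun p => p.2)).sum) := by
  induction n with
  | zero =>
    intro ps add h
    rw [List.length_eq_zero_iff] at h
    subst h
    constructor <;> simp [pairLoop, PySem.List.sorted, evens]
  | succ n ih =>
    intro ps add h
    have hne : ps.map (fun p => p.1 + p.2) ≠ [] := by
      simp [List.map_eq_nil_iff]; intro hc; subst hc; simp at h
    cases hm : PySem.List.max? (ps.map (fun p => p.1 + p.2)) (fun x => x) with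
    | none => exact absurd ((PySem.List.max?_eq_none_iff _ _).mp hm) hne
    | some m =>
      have hmem : m ∈ ps.map (fun p => p.1 + p.2) := PySem.List.max?_mem hm
      cases hi : PySem.List.index? (ps.map (fun p => p.1 + p.2)) m with
      | none =>
        have := (PySem.List.index?_isSome_iff (ps.map (fun p => p.1 + p.2)) m).mpr hmem
        rw [hi] at this
        simp at this
      | some idx =>
        obtain ⟨hk, hget, -⟩ := PySem.List.getElem_of_index?_eq_some hi
        have hkps : idx < ps.length := by simpa using hk
        have hlen : (ps.eraseIdx idx).length = n := by
          rw [List.length_eraseIdx_of_lt hkps, h]; rfl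
        have hperm : ((ps[idx]) :: ps.eraseIdx idx).Perm ps := List.getElem_cons_eraseIdx_perm hkps
        have hsum : ((ps.eraseIdx idx).map (fun p => p.2)).sum = (ps.map (fun p => p.2)).sum - (ps[idx]).2 := by
          have := (hperm.map (fun p => p.2)).sum_eq
          simp at this
          omega
        have hsort := sorted_rev_head_step _ m idx hm hi
        rw [List.eraseIdx_map] at hsort
        have hme : m = (ps[idx]).1 + (ps[idx]).2 := by
          rw [← hget]; simp
        have e5 : ps[idx]?.getD (0, 0) = ps[idx] := by
          simp [List.getElem?_eq_getElem hkps]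
        have ih0 := (ih (ps.eraseIdx idx) (add + (ps[idx]).1) hlen).2
        have ih1 := (ih (ps.eraseIdx idx) (add - (ps[idx]).2) hlen).1
        constructor
        · simp only [pairLoop, hm, hi]
          norm_num [List.getD]
          rw [e5, ih0, hsort, evens_cons, hsum]
          simp only [List.sum_cons]
          omega
        · simp only [pairLoop, hm, hi]
          norm_num [List.getD]
          rw [e5, ih1, hsort, hsum]
          simp only [List.tail_cons]
          omega

-- A's three-list loop computes the same as the single-list pair loop
theorem funGameLoop_eq_pairLoop (n : Nat) : ∀ (ps : List (Int × Int)) (be : List Int) (add turn : Int),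
    ps.length = n →
    funGameLoop n (ps.map (fun p => p.1 + p.2)) (ps.map (fun p => p.1)) (ps.map (fun p => p.2) ++ be) add turn
      = pairLoop n ps add turn := by
  induction n with
  | zero => intro ps be add turn h; rfl
  | succ n ih =>
    intro ps be add turn h
    simp only [funGameLoop, pairLoop]
    cases hm : PySem.List.max? (ps.map (fun p => p.1 + p.2)) (fun x => x) with
    | none => rfl
    | some m =>
      simp only []
      cases hi : PySem.List.index? (ps.map (fun p => p.1 + p.2)) m with
      | none => rfl
      | some idx =>
        simp only []
        obtain ⟨hk, hget, -⟩ := PySem.List.getElem_of_index?_eq_some hi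
        have hkps : idx < ps.length := by simpa using hk
        have e2 : PySem.List.pyGetD (ps.map (fun p => p.1)) (idx : Int) 0 = (ps[idx]).1 := by
          rw [PySem.List.pyGetD_natCast]; simp [List.getD, hkps]
        have e3 : PySem.List.pyGetD (ps.map (fun p => p.2) ++ be) (idx : Int) 0 = (ps[idx]).2 := by
          rw [PySem.List.pyGetD_natCast]
          unfold List.getD
          rw [List.getElem?_append_left (by simpa using hkps)]
          simp [hkps]
        have e4 : (ps.map (fun p => p.2) ++ be).eraseIdx idx = (ps.eraseIdx idx).map (fun p => p.2) ++ be := by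
          rw [List.eraseIdx_append_of_lt_length (by simpa using hkps), List.eraseIdx_map]
        have e5 : ps.getD idx (0, 0) = ps[idx] := by simp [List.getD, hkps]
        rw [e2, e3, e4, List.eraseIdx_map, List.eraseIdx_map]
        rw [ih _ be _ _ (by rw [List.length_eraseIdx_of_lt hkps, h]; rfl)]
        rw [e5]

-- A's initial totals list is the map of pairwise sums over zip(a, b)
theorem totals_init (a b : List Int) (h : a.length ≤ b.length) :
    (PySem.List.pyRange 0 (a.length : Int) 1).map
      (fun i => PySem.List.pyGetD a i 0 + PySem.List.pyGetD b i 0)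
    = (a.zip b).map (fun p => p.1 + p.2) := by
  rw [PySem.List.pyRange_one, List.map_map]
  apply List.ext_getElem
  · simp [List.length_zip]; omega
  · intro k h1 h2
    have hk : k < a.length := by simp at h1; omega
    have hkb : k < b.length := lt_of_lt_of_le hk h
    simp only [List.getElem_map, List.getElem_range, Function.comp]
    rw [List.getElem_zip]
    norm_num [List.getD, List.getElem?_eq_getElem hk, List.getElem?_eq_getElem hkb]

-- ===== VERDICT (by name: the statement is the Claim_ definition above) =====
theorem funGame_spec : Claim_equal_funGame := by
  intro a b _ hpre
  unfold Pre_funGame at hpre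
  simp only [Spec_funGame, funGame, funGame_alt]
  have hzip_len : (a.zip b).length = a.length := by rw [List.length_zip]; omega
  have hfst : (a.zip b).map (fun p => p.1) = a := List.map_fst_zip hpre
  have htake : (a.zip b).map (fun p => p.2) = b.take a.length := by
    rw [List.zip_eq_zip_take_min]
    have hmin : min a.length b.length = a.length := by omega
    rw [hmin, List.take_length]
    exact List.map_snd_zip (by simp)
  have hA := funGameLoop_eq_pairLoop (a.zip b).length (a.zip b) (b.drop a.length) 0 0 rfl
  rw [htake, List.take_append_drop, hfst, hzip_len] at hA
  have hB := (pairLoop_closed (a.zip b).length (a.zip b) 0 rfl).1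
  rw [hzip_len] at hB
  rw [totals_init a b hpre, hA, hB, slice?_step_two]
  norm_num
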